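-- pv_equiv track=rewrite | github.com/sol-commits/coding-test | 백준/Silver/2512. 예산/예산.py | solution
-- ===== SOURCE A (Python) =====
-- def solution(region_cnt, budgets, budgets_sum):
--     budgets.sort()
--
--     if sum(budgets) <= budgets_sum: return budgets[-1]
--
--     left = 0
--     right = budgets[-1]
--     mid = (left + right) // 2
--     answer = 0
--
--     while left < right - 1:
--         temp = sum(b if b <= mid else mid for b in budgets)
--         if temp <= budgets_sum:
--             answer = max(answer, mid)
--             left = mid
--         else:
--             right = mid
--
--         mid = (left + right) // 2
--
--     return answer
-- ===== SOURCE B (Python) =====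
-- def solution(region_cnt, budgets, budgets_sum):
--     # Note: like A, this sorts `budgets` in place (same observable side effect).
--     budgets.sort()
--     if sum(budgets) <= budgets_sum:
--         return budgets[-1]
--     n = len(budgets)
--     prefix = 0
--     for k, b in enumerate(budgets):
--         # cheapest n-k items are fully paid (prefix); cap c applies to the rest
--         c = (budgets_sum - prefix) // (n - k)
--         if c < b:
--             return max(c, 0)
--         prefix += b
--     return 0  # unreachable: sum(budgets) > budgets_sum guarantees an early return
-- ===== Notes on version B (the rewrite author's own statement) =====
-- stated objective: alternative
-- what changed: Replaces A's binary search over the cap value (recomputing the capped sum of all budgets at every probe) with a single pass over the sorted list that keeps a running prefix sum and derives the cap analytically from the remaining budget and count.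
import Mathlib
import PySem

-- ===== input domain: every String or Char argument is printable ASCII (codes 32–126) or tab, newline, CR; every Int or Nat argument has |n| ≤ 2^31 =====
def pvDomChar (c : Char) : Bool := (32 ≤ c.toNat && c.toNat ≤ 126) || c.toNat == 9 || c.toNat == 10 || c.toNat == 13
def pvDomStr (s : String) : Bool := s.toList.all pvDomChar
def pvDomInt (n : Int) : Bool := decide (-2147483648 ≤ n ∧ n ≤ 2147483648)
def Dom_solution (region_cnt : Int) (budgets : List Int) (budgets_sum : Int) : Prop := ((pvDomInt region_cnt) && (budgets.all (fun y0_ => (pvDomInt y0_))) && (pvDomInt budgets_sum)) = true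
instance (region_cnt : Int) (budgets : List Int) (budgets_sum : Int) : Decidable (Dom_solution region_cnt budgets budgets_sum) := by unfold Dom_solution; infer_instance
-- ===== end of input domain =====

-- B replaces A's binary search on the cap (each probe recomputes the capped sum of the whole
-- list) with one pref-sum pass over the sorted list that derives the cap analytically.
-- Both A and B sort `budgets` in place (same side effect); the equivalence proved is about
-- the return value.

-- ===== PORT A =====
-- temp = sum(b if b <= mid else mid for b in budgets)
def capsumA (bs : List Int) (mid : Int) : Int :=
  (bs.map (fun b => if b ≤ mid then b else mid)).sum

-- A's while-loop: left/right/answer state, midpoint probe `mid = (left+right)//2` (inlined).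
def loopA (budgets_sum : Int) (bs : List Int) (left right answer : Int) : Int :=
  if _h : left < right - 1 then
    if capsumA bs (PySem.Int.floordiv (left + right) 2) ≤ budgets_sum then
      loopA budgets_sum bs (PySem.Int.floordiv (left + right) 2) right
        (max answer (PySem.Int.floordiv (left + right) 2))
    else
      loopA budgets_sum bs left (PySem.Int.floordiv (left + right) 2) answer
  else answer
termination_by (right - left).toNat
decreasing_by
  all_goals
    have h2 := PySem.Int.floordiv_eq_ediv_of_pos (a := left + right) (show (0:Int) < 2 by norm_num)
    simp only [h2]; omega

def solution (region_cnt : Int) (budgets : List Int) (budgets_sum : Int) : Int :=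
  let bs := PySem.List.sorted budgets (fun x => x) false   -- budgets.sort()
  if bs.sum ≤ budgets_sum then PySem.List.pyGetD bs (-1) 0 -- budgets[-1] (Pre_: nonempty)
  else loopA budgets_sum bs 0 (PySem.List.pyGetD bs (-1) 0) 0

-- ===== PORT B =====
-- B's for-loop over the sorted list: `rest` is the not-yet-paid suffix, `pref` the sum paid so far.
def scanB (budgets_sum : Int) : List Int → Int → Int
  | [], _ => 0   -- the unreachable fall-through `return 0`
  | b :: rest, pref =>
    let c := PySem.Int.floordiv (budgets_sum - pref) ((b :: rest).length : Int)
    if c < b then max c 0 else scanB budgets_sum rest (pref + b)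

def solution_alt (region_cnt : Int) (budgets : List Int) (budgets_sum : Int) : Int :=
  let bs := PySem.List.sorted budgets (fun x => x) false   -- budgets.sort()
  if bs.sum ≤ budgets_sum then PySem.List.pyGetD bs (-1) 0 -- budgets[-1] (Pre_: nonempty)
  else scanB budgets_sum bs 0

-- ===== PRECONDITION & SPEC =====
-- Pre_ excludes only budgets = [], on which A raises IndexError at budgets[-1].
def Pre_solution (region_cnt : Int) (budgets : List Int) (budgets_sum : Int) : Prop :=
  budgets ≠ []
instance (region_cnt : Int) (budgets : List Int) (budgets_sum : Int) : Decidable (Pre_solution region_cnt budgets budgets_sum) := by unfold Pre_solution; infer_instance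

def pvWitness_solution : Int × List Int × Int := (3, [1, 2, 3], 4)

def Spec_solution (region_cnt : Int) (budgets : List Int) (budgets_sum : Int) (out : Int) : Prop := out = solution_alt region_cnt budgets budgets_sum
instance (region_cnt : Int) (budgets : List Int) (budgets_sum : Int) (out : Int) : Decidable (Spec_solution region_cnt budgets budgets_sum out) := by unfold Spec_solution; infer_instance

-- ===== CLAIM (what is proved, stated in full; the proofs are below) =====
def Claim_equal_solution : Prop := ∀ (region_cnt : Int) (budgets : List Int) (budgets_sum : Int), Dom_solution region_cnt budgets budgets_sum → Pre_solution region_cnt budgets budgets_sum → Spec_solution region_cnt budgets budgets_sum (solution region_cnt budgets budgets_sum)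


-- ===== LEMMAS AND PROOFS =====

-- capped sum: Σ min(b, c) over the list
def gmin (bs : List Int) (c : Int) : Int := (bs.map (fun b => min b c)).sum

theorem capsum_eq_gmin (bs : List Int) (c : Int) :
    capsumA bs c = gmin bs c := by
  simp [capsumA, gmin, min_def]

theorem gmin_mono (bs : List Int) {c d : Int} (h : c ≤ d) : gmin bs c ≤ gmin bs d := by
  induction bs with
  | nil => simp [gmin]
  | cons b t ih =>
      simp only [gmin, List.map_cons, List.sum_cons] at *
      exact add_le_add (min_le_min le_rfl h) ih

theorem gmin_const (bs : List Int) {c : Int} (h : ∀ x ∈ bs, c ≤ x) :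
    gmin bs c = (bs.length : Int) * c := by
  induction bs with
  | nil => simp [gmin]
  | cons b t ih =>
      have hb : min b c = c := min_eq_right (h b (by simp))
      have ht := ih (fun x hx => h x (by simp [hx]))
      simp only [gmin, List.map_cons, List.sum_cons] at *
      rw [hb, ht]; simp [List.length_cons]; ring

theorem gmin_full (bs : List Int) {c : Int} (h : ∀ x ∈ bs, x ≤ c) :
    gmin bs c = bs.sum := by
  induction bs with
  | nil => simp [gmin]
  | cons b t ih =>
      have hb : min b c = b := min_eq_left (h b (by simp))
      have ht := ih (fun x hx => h x (by simp [hx]))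
      simp only [gmin, List.map_cons, List.sum_cons] at *
      rw [hb, ht]

-- the characterising predicate: r is A's/B's answer
def Ans (budgets_sum : Int) (bs : List Int) (r : Int) : Prop :=
  0 ≤ r ∧ budgets_sum < gmin bs (r + 1) ∧ (gmin bs r ≤ budgets_sum ∨ r = 0)

theorem Ans_unique {L : Int} {bs : List Int} {r1 r2 : Int}
    (h1 : Ans L bs r1) (h2 : Ans L bs r2) : r1 = r2 := by
  by_contra hne
  rcases h1 with ⟨h1a, h1b, h1c⟩
  rcases h2 with ⟨h2a, h2b, h2c⟩
  rcases lt_or_gt_of_ne hne with hlt | hlt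
  · have : gmin bs (r1 + 1) ≤ gmin bs r2 := gmin_mono bs (by omega)
    rcases h2c with h | h
    · omega
    · omega
  · have : gmin bs (r2 + 1) ≤ gmin bs r1 := gmin_mono bs (by omega)
    rcases h1c with h | h
    · omega
    · omega

theorem loopA_spec (L : Int) (bs : List Int) :
    ∀ (left right answer : Int), 0 ≤ left → L < gmin bs right →
      ((answer = 0 ∧ left = 0) ∨ (answer = left ∧ 1 ≤ left ∧ gmin bs left ≤ L)) →
      Ans L bs (loopA L bs left right answer) := by
  intro left right answer
  induction left, right, answer using loopA.induct L bs with
  | case1 left right answer h htemp ih =>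
      intro h0 hr hinv
      set mid := PySem.Int.floordiv (left + right) 2 with hmiddef
      have hmid : left < mid ∧ mid < right := by
        have h2 := PySem.Int.floordiv_eq_ediv_of_pos (a := left + right) (show (0:Int) < 2 by norm_num)
        constructor <;> (rw [hmiddef, h2]) <;> omega
      rw [loopA.eq_def]
      simp only [dif_pos h, ← hmiddef, if_pos htemp]
      have htemp' : gmin bs mid ≤ L := by rw [← capsum_eq_gmin]; exact htemp
      have hmax : max answer mid = mid := by
        rcases hinv with ⟨ha, hl⟩ | ⟨ha, hl, _⟩ <;> omega
      exact ih (by omega) hr (Or.inr ⟨hmax, by omega, htemp'⟩)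
  | case2 left right answer h htemp ih =>
      intro h0 hr hinv
      set mid := PySem.Int.floordiv (left + right) 2 with hmiddef
      have hmid : left < mid ∧ mid < right := by
        have h2 := PySem.Int.floordiv_eq_ediv_of_pos (a := left + right) (show (0:Int) < 2 by norm_num)
        constructor <;> (rw [hmiddef, h2]) <;> omega
      rw [loopA.eq_def]
      simp only [dif_pos h, ← hmiddef, if_neg htemp]
      have htemp' : L < gmin bs mid := by rw [← capsum_eq_gmin]; omega
      exact ih (by omega) htemp' hinv
  | case3 left right answer h =>
      intro h0 hr hinv
      rw [loopA.eq_def]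
      simp only [dif_neg h]
      rcases hinv with ⟨ha, hl⟩ | ⟨ha, hl, hle⟩
      · subst ha; subst hl
        refine ⟨le_rfl, ?_, Or.inr rfl⟩
        have : gmin bs right ≤ gmin bs (0 + 1) := gmin_mono bs (by omega)
        omega
      · refine ⟨by omega, ?_, Or.inl (ha ▸ hle)⟩
        have : gmin bs right ≤ gmin bs (answer + 1) := gmin_mono bs (by omega)
        omega

theorem floordiv_bracket {a n : Int} (hn : 0 < n) :
    PySem.Int.floordiv a n * n ≤ a ∧ a < (PySem.Int.floordiv a n + 1) * n := by
  constructor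
  · exact (PySem.Int.le_floordiv_iff_mul_le hn).mp le_rfl
  · exact (PySem.Int.floordiv_lt_iff_lt_mul hn).mp (by omega)

theorem scanB_spec (L : Int) :
    ∀ (rest : List Int) (p b0 : Int), rest.Pairwise (· ≤ ·) →
      (∀ x ∈ rest, b0 ≤ x) → b0 * (rest.length : Int) ≤ L - p → L < p + rest.sum →
      ∃ c, scanB L rest p = max c 0 ∧ b0 ≤ c ∧
        p + gmin rest c ≤ L ∧ L < p + gmin rest (c + 1) := by
  intro rest
  induction rest with
  | nil => intro p b0 _ _ hb0 hfall; simp at hb0 hfall; omega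
  | cons b t ih =>
      intro p b0 hpw hlb hb0 hfall
      have hlen : (0:Int) < ((b :: t).length : Int) := by exact_mod_cast t.length.succ_pos
      set n : Int := ((b :: t).length : Int) with hn
      set c := PySem.Int.floordiv (L - p) n with hc
      have hbr := floordiv_bracket (a := L - p) hlen
      have hb0c : b0 ≤ c := by
        rw [hc, hn]
        exact (PySem.Int.le_floordiv_iff_mul_le hlen).mpr hb0
      have hpwt : t.Pairwise (· ≤ ·) := hpw.sublist (List.sublist_cons_self b t)
      have hbt : ∀ x ∈ t, b ≤ x := fun x hx => (List.pairwise_cons.mp hpw).1 x hx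
      by_cases hcb : c < b
      · refine ⟨c, ?_, hb0c, ?_, ?_⟩
        · rw [scanB]; simp only [← hn, ← hc, if_pos hcb]
        · have : gmin (b :: t) c = n * c := by
            rw [gmin_const (b :: t) (fun x hx => ?_), hn]
            rcases List.mem_cons.mp hx with h | h
            · omega
            · have := hbt x h; omega
          rw [this]; nlinarith [hbr.1]
        · have : gmin (b :: t) (c + 1) = n * (c + 1) := by
            rw [gmin_const (b :: t) (fun x hx => ?_), hn]
            rcases List.mem_cons.mp hx with h | h
            · omega
            · have := hbt x h; omega
          rw [this]; nlinarith [hbr.2]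
      · rw [not_lt] at hcb
        have hbn : b * ((t.length : Int)) ≤ L - (p + b) := by
          have hbc : b * n ≤ c * n := by
            exact mul_le_mul_of_nonneg_right hcb (le_of_lt hlen)
          have hn' : n = (t.length : Int) + 1 := by rw [hn]; simp
          have h2 : b * ((t.length : Int) + 1) ≤ L - p := by
            rw [← hn']; exact le_trans hbc hbr.1
          ring_nf at h2
          linarith [h2]
        have hfall' : L < (p + b) + t.sum := by
          simp only [List.sum_cons] at hfall; omega
        obtain ⟨c', heq, hbc', hle', hgt'⟩ := ih (p + b) b hpwt hbt hbn hfall'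
        refine ⟨c', ?_, le_trans (hlb b (by simp)) hbc', ?_, ?_⟩
        · rw [scanB]; simp only [← hn, ← hc, if_neg (not_lt.mpr hcb)]; exact heq
        · have : gmin (b :: t) c' = b + gmin t c' := by
            simp only [gmin, List.map_cons, List.sum_cons, min_eq_left hbc']
          omega
        · have : gmin (b :: t) (c' + 1) = b + gmin t (c' + 1) := by
            simp only [gmin, List.map_cons, List.sum_cons,
              min_eq_left (by omega : b ≤ c' + 1)]
          omega

-- every member of a ≤-pairwise list is ≤ its last element
theorem pw_le_getLast : ∀ (l : List Int) (h : l ≠ []), l.Pairwise (· ≤ ·) →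
    ∀ x ∈ l, x ≤ l.getLast h := by
  intro l
  induction l with
  | nil => intro h; exact absurd rfl h
  | cons a t ih =>
      intro _ hpw x hx
      cases t with
      | nil => simp at hx; simp [hx, List.getLast]
      | cons b t' =>
          rw [List.getLast_cons (by simp)]
          rcases List.mem_cons.mp hx with rfl | hx'
          · have hmem := List.getLast_mem (l := b :: t') (by simp)
            exact le_trans ((List.pairwise_cons.mp hpw).1 _ hmem) le_rfl
          · exact ih (by simp) (List.pairwise_cons.mp hpw).2 x hx'

theorem scanB_Ans (L : Int) (bs : List Int) (hne : bs ≠ [])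
    (hpw : bs.Pairwise (· ≤ ·)) (hfall : L < bs.sum) :
    Ans L bs (scanB L bs 0) := by
  obtain ⟨m, t, hmt⟩ : ∃ m t, bs = m :: t := by
    cases bs with
    | nil => exact absurd rfl hne
    | cons m t => exact ⟨m, t, rfl⟩
  have hlen : (0:Int) < (bs.length : Int) := by rw [hmt]; exact_mod_cast t.length.succ_pos
  set b0 := min m (PySem.Int.floordiv L (bs.length : Int)) with hb0
  have hlb : ∀ x ∈ bs, b0 ≤ x := by
    intro x hx
    have hmx : m ≤ x := by
      rw [hmt] at hx
      rcases List.mem_cons.mp hx with rfl | hx'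
      · exact le_rfl
      · rw [hmt] at hpw; exact (List.pairwise_cons.mp hpw).1 x hx'
    omega
  have hfl : PySem.Int.floordiv L (bs.length : Int) * (bs.length : Int) ≤ L :=
    (floordiv_bracket hlen).1
  have hb0n : b0 * (bs.length : Int) ≤ L - 0 := by
    have : b0 ≤ PySem.Int.floordiv L (bs.length : Int) := by omega
    nlinarith
  obtain ⟨c, heq, _, hle, hgt⟩ := scanB_spec L bs 0 b0 hpw hlb hb0n (by omega)
  rw [heq]
  by_cases hc : 0 ≤ c
  · rw [max_eq_left hc]
    exact ⟨hc, by omega, Or.inl (by omega)⟩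
  · rw [max_eq_right (by omega)]
    refine ⟨le_rfl, ?_, Or.inr rfl⟩
    have : gmin bs (c + 1) ≤ gmin bs (0 + 1) := gmin_mono bs (by omega)
    omega

theorem loopA_Ans (L : Int) (bs : List Int) (hne : bs ≠ [])
    (hpw : bs.Pairwise (· ≤ ·)) (hfall : L < bs.sum) :
    Ans L bs (loopA L bs 0 (PySem.List.pyGetD bs (-1) 0) 0) := by
  have hM : PySem.List.pyGetD bs (-1) 0 = bs.getLast hne :=
    PySem.List.pyGetD_neg_one bs 0 hne
  have hful : gmin bs (bs.getLast hne) = bs.sum :=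
    gmin_full bs (pw_le_getLast bs hne hpw)
  rw [hM]
  exact loopA_spec L bs 0 (bs.getLast hne) 0 le_rfl (by omega)
    (Or.inl ⟨rfl, rfl⟩)

-- ===== VERDICT (by name: the statement is the Claim_ definition above) =====
theorem solution_spec : Claim_equal_solution := by
  intro region_cnt budgets budgets_sum _ hpre
  unfold Spec_solution solution solution_alt
  set bs := PySem.List.sorted budgets (fun x => x) false with hbs
  have hne : bs ≠ [] := by
    rw [hbs, Ne, PySem.List.sorted_eq_nil_iff]; exact hpre
  have hpw : bs.Pairwise (· ≤ ·) := by
    rw [hbs]; exact PySem.List.sorted_pairwise budgets (fun x => x)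
  by_cases hsum : bs.sum ≤ budgets_sum
  · simp only [if_pos hsum]
  · simp only [if_neg hsum]
    exact Ans_unique (loopA_Ans budgets_sum bs hne hpw (by omega))
      (scanB_Ans budgets_sum bs hne hpw (by omega))
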